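-- pv_equiv track=rewrite | github.com/vosslab/biology-problems | inheritance-problems/genemapping/genemaplib.py | crossover_after_index
-- ===== SOURCE A (Python) =====
-- import copy
--
-- def flip_gene_by_letter(genotype: str, gene_letter: str, gene_letters: str) -> str:
-- 	"""
-- 	Flips a specified gene in the genotype.
--
-- 	Parameters
-- 	----------
-- 	genotype : str
-- 		The original genotype.
-- 	gene : str
-- 		The gene to flip.
-- 	gene_letters : str
-- 		The basic type used as a reference for flipping the gene.
--
-- 	Returns
-- 	-------
-- 	str
-- 		The new genotype after the gene has been flipped.
-- 	"""
-- 	# Convert genotype string to a list for easier manipulation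
-- 	newlist = list(genotype)
--
-- 	# Iterate through the genotype to find and flip the specified gene
-- 	for i in range(len(genotype)):
-- 		if gene_letters[i] == gene_letter:
-- 			if genotype[i] == '+':
-- 				newlist[i] = gene_letters[i]
-- 			else:
-- 				newlist[i] = '+'
--
-- 	# Join the list back into a string to form the new genotype
-- 	newtype = ''.join(newlist)
--
-- 	# Return the new genotype
-- 	return newtype
--
-- def crossover_after_index(genotype: str, gene_index: str, gene_order: str) -> str:
-- 	"""
-- 	Flips a specified gene in the genotype.
--
-- 	parent genotypes: ++++, abcd
-- 	index 1: +bcd, a+++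
-- 	index 2: ++cd, ab++
-- 	index 3: +++d, abc+
--
-- 	Parameters
-- 	----------
-- 	genotype : str
-- 		The original genotype.
-- 	gene : str
-- 		The gene to flip.
-- 	gene_order : str
-- 		The basic type used as a reference for flipping the gene.
-- 	"""
-- 	sorted_genes = ''.join(sorted(list(gene_order)))
--
-- 	new_genotype = copy.copy(genotype)
-- 	# Iterate through the genotype to find and flip the specified gene
-- 	for i in range(len(genotype)):
-- 		if i >= gene_index:
-- 			gene_letter = gene_order[i]
-- 			new_genotype = flip_gene_by_letter(new_genotype, gene_letter, sorted_genes)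
-- 	# Return the new genotype
-- 	return new_genotype
-- ===== SOURCE B (Python) =====
-- def crossover_after_index(genotype: str, gene_index: str, gene_order: str) -> str:
-- 	# Count, per letter, how many crossover flips hit it; then build the
-- 	# result in one pass per position using the parity of that count.
-- 	n = len(genotype)
-- 	crossed = [gene_order[i] for i in range(n) if i >= gene_index]
-- 	if not crossed:
-- 		return genotype
-- 	counts = {}
-- 	for c in crossed:
-- 		counts[c] = counts.get(c, 0) + 1
-- 	sorted_genes = ''.join(sorted(gene_order))
-- 	out = []
-- 	for j in range(n):
-- 		c = sorted_genes[j]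
-- 		k = counts.get(c, 0)
-- 		g = genotype[j]
-- 		if k == 0:
-- 			out.append(g)
-- 		elif k % 2 == 1:
-- 			out.append(c if g == '+' else '+')
-- 		else:
-- 			out.append('+' if g == '+' else c)
-- 	return ''.join(out)
-- ===== Notes on version B (the rewrite author's own statement) =====
-- stated objective: alternative
-- what changed: A repeatedly rebuilds the whole genotype with one full flip pass per crossed-over gene (nested quadratic loops); B counts the crossover occurrences of each letter once in a dictionary and writes each output character directly from the parity of that count in a single pass.
import Mathlib
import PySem

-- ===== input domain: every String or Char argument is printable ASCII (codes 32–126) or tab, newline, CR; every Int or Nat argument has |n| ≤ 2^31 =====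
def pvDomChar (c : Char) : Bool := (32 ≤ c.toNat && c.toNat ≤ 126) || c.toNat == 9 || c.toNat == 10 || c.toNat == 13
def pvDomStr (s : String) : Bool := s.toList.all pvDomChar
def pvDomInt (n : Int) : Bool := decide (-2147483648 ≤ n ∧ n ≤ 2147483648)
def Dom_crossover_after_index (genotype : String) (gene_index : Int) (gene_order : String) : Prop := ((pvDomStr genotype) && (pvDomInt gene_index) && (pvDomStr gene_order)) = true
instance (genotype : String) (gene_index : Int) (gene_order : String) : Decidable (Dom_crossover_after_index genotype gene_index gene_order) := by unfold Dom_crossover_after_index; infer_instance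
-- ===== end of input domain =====

-- B replaces A's one-full-flip-pass-per-crossed-gene nested loops by a per-letter
-- crossover count and a single parity-driven output pass (objective: alternative).

-- ===== PORT A =====
-- flip_gene_by_letter: newlist = list(genotype); for i in range(len(genotype)):
--   if gene_letters[i] == gene_letter: newlist[i] = gene_letters[i] if genotype[i] == '+' else '+'
-- (in-range indexing under Pre_; List.getD with an arbitrary default is exact there)
def pvFlipGene (genotype : List Char) (gene_letter : Char) (gene_letters : List Char) : List Char :=
  (List.range genotype.length).foldl (fun (newlist : List Char) (i : Nat) =>
    if gene_letters.getD i ' ' = gene_letter then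
      newlist.set i (if genotype.getD i ' ' = '+' then gene_letters.getD i ' ' else '+')
    else newlist) genotype

def crossover_after_index (genotype : String) (gene_index : Int) (gene_order : String) : String :=
  let sorted_genes := PySem.List.sorted gene_order.toList (fun x => x) false
  String.ofList ((List.range genotype.toList.length).foldl
    (fun (new_genotype : List Char) (i : Nat) =>
      if gene_index ≤ (i : Int) then
        pvFlipGene new_genotype (gene_order.toList.getD i ' ') sorted_genes
      else new_genotype) genotype.toList)

-- ===== PORT B =====
def crossover_after_index_alt (genotype : String) (gene_index : Int) (gene_order : String) : String :=
  let g := genotype.toList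
  let n := g.length
  let crossed := ((List.range n).filter (fun (i : Nat) => decide (gene_index ≤ (i : Int)))).map
      (fun (i : Nat) => gene_order.toList.getD i ' ')
  if crossed.isEmpty then genotype
  else
    let counts := crossed.foldl (fun d c => d.insert c (d.getD c 0 + 1)) PySem.Dict.empty
    let sorted_genes := PySem.List.sorted gene_order.toList (fun x => x) false
    String.ofList ((List.range n).map (fun (j : Nat) =>
      let c := sorted_genes.getD j ' '
      let k := counts.getD c 0
      let gch := g.getD j ' '
      if k = 0 then gch
      else if PySem.Int.mod k 2 = 1 then (if gch = '+' then c else '+')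
      else (if gch = '+' then '+' else c)))

-- ===== PRECONDITION & SPEC =====
-- Pre_ excludes exactly the inputs where A raises IndexError: some loop index i ≥ gene_index
-- reaches gene_order[i] or sorted_genes[j] past the end of gene_order.
def Pre_crossover_after_index (genotype : String) (gene_index : Int) (gene_order : String) : Prop :=
  genotype.toList.length ≤ gene_order.toList.length ∨ (genotype.toList.length : Int) ≤ gene_index
instance (genotype : String) (gene_index : Int) (gene_order : String) : Decidable (Pre_crossover_after_index genotype gene_index gene_order) := by unfold Pre_crossover_after_index; infer_instance

def pvWitness_crossover_after_index : String × Int × String := ("ab+", 1, "bac")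

def Spec_crossover_after_index (genotype : String) (gene_index : Int) (gene_order : String) (out : String) : Prop := out = crossover_after_index_alt genotype gene_index gene_order
instance (genotype : String) (gene_index : Int) (gene_order : String) (out : String) : Decidable (Spec_crossover_after_index genotype gene_index gene_order out) := by unfold Spec_crossover_after_index; infer_instance

-- ===== CLAIM (what is proved, stated in full; the proofs are below) =====
def Claim_equal_crossover_after_index : Prop := ∀ (genotype : String) (gene_index : Int) (gene_order : String), Dom_crossover_after_index genotype gene_index gene_order → Pre_crossover_after_index genotype gene_index gene_order → Spec_crossover_after_index genotype gene_index gene_order (crossover_after_index genotype gene_index gene_order)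

-- ===== LEMMAS AND PROOFS =====

-- the flip rule applied to one character
def pvToggle (c g : Char) : Char := if g = '+' then c else '+'

-- generic shape of flip's loop: fold over range with a conditional set at the index
theorem pv_fold_set_length (P : Nat → Prop) [DecidablePred P] (v : Nat → Char) :
    ∀ (l : List Nat) (acc : List Char),
      (l.foldl (fun (nl : List Char) (i : Nat) => if P i then nl.set i (v i) else nl) acc).length
        = acc.length := by
  intro l
  induction l with
  | nil => intro acc; rfl
  | cons x xs ih =>
    intro acc
    simp only [List.foldl_cons]
    rw [ih]
    split <;> simp

theorem pv_fold_set_getD (P : Nat → Prop) [DecidablePred P] (v : Nat → Char) :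
    ∀ (m : Nat) (acc : List Char) (j : Nat) (d : Char), j < acc.length →
      ((List.range m).foldl (fun (nl : List Char) (i : Nat) =>
          if P i then nl.set i (v i) else nl) acc).getD j d
        = if j < m ∧ P j then v j else acc.getD j d := by
  intro m
  induction m with
  | zero => intro acc j d hj; simp
  | succ m ih =>
    intro acc j d hj
    rw [List.range_succ, List.foldl_append]
    simp only [List.foldl_cons, List.foldl_nil]
    have hlen : ((List.range m).foldl (fun (nl : List Char) (i : Nat) =>
        if P i then nl.set i (v i) else nl) acc).length = acc.length :=
      pv_fold_set_length P v _ acc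
    by_cases hPm : P m
    · rw [if_pos hPm]
      by_cases hjm : j = m
      · subst hjm
        rw [List.getD_eq_getElem?_getD, List.getElem?_set_self',
          List.getElem?_eq_getElem (by omega)]
        rw [if_pos ⟨by omega, hPm⟩]
        simp
      · rw [List.getD_eq_getElem?_getD, List.getElem?_set_ne (by omega),
          ← List.getD_eq_getElem?_getD, ih acc j d hj]
        by_cases hjlt : j < m
        · by_cases hPj : P j
          · rw [if_pos ⟨hjlt, hPj⟩, if_pos ⟨by omega, hPj⟩]
          · rw [if_neg (fun h => hPj h.2), if_neg (fun h => hPj h.2)]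
        · have h1 : ¬ (j < m ∧ P j) := fun h => hjlt h.1
          have h2 : ¬ (j < m + 1 ∧ P j) := by
            intro h
            exact hjm (by omega)
          rw [if_neg h1, if_neg h2]
    · rw [if_neg hPm, ih acc j d hj]
      by_cases hjlt : j < m
      · by_cases hPj : P j
        · rw [if_pos ⟨hjlt, hPj⟩, if_pos ⟨by omega, hPj⟩]
        · rw [if_neg (fun h => hPj h.2), if_neg (fun h => hPj h.2)]
      · have h1 : ¬ (j < m ∧ P j) := fun h => hjlt h.1
        have h2 : ¬ (j < m + 1 ∧ P j) := by
          intro h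
          have : j = m := by omega
          exact hPm (this ▸ h.2)
        rw [if_neg h1, if_neg h2]

theorem pvFlipGene_length (genotype : List Char) (c : Char) (letters : List Char) :
    (pvFlipGene genotype c letters).length = genotype.length :=
  pv_fold_set_length (fun i => letters.getD i ' ' = c)
    (fun i => if genotype.getD i ' ' = '+' then letters.getD i ' ' else '+') _ _

theorem pvFlipGene_getD (genotype : List Char) (c : Char) (letters : List Char)
    (j : Nat) (hj : j < genotype.length) :
    (pvFlipGene genotype c letters).getD j ' '
      = if letters.getD j ' ' = c then pvToggle (letters.getD j ' ') (genotype.getD j ' ')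
        else genotype.getD j ' ' := by
  unfold pvFlipGene
  rw [pv_fold_set_getD (fun i => letters.getD i ' ' = c)
        (fun i => if genotype.getD i ' ' = '+' then letters.getD i ' ' else '+')
        genotype.length genotype j ' ' hj]
  by_cases h : letters.getD j ' ' = c
  · rw [if_pos ⟨hj, h⟩, if_pos h]
    unfold pvToggle
    rfl
  · rw [if_neg (fun hh => h hh.2), if_neg h]

-- A's per-position flip count over the first m loop iterations
def pvCnt (gene_index : Int) (ord s : List Char) (j m : Nat) : Nat :=
  (List.range m).countP (fun (i : Nat) =>
    (ord.getD i ' ' == s.getD j ' ') && decide (gene_index ≤ (i : Int)))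

theorem pv_outer_length (g ord s : List Char) (gene_index : Int) (m : Nat) :
    ((List.range m).foldl (fun (ng : List Char) (i : Nat) =>
      if gene_index ≤ (i : Int) then pvFlipGene ng (ord.getD i ' ') s else ng) g).length
      = g.length := by
  induction m with
  | zero => rfl
  | succ m ih =>
    rw [List.range_succ, List.foldl_append]
    simp only [List.foldl_cons, List.foldl_nil]
    split
    · rw [pvFlipGene_length, ih]
    · exact ih

theorem pv_outer_getD (g ord s : List Char) (gene_index : Int) (m j : Nat) (hj : j < g.length) :
    ((List.range m).foldl (fun (ng : List Char) (i : Nat) =>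
      if gene_index ≤ (i : Int) then pvFlipGene ng (ord.getD i ' ') s else ng) g).getD j ' '
      = (pvToggle (s.getD j ' '))^[pvCnt gene_index ord s j m] (g.getD j ' ') := by
  induction m with
  | zero => simp [pvCnt]
  | succ m ih =>
    rw [List.range_succ, List.foldl_append]
    simp only [List.foldl_cons, List.foldl_nil]
    have hcnt : pvCnt gene_index ord s j (m + 1)
        = pvCnt gene_index ord s j m
          + (if gene_index ≤ (m : Int) ∧ ord.getD m ' ' = s.getD j ' ' then 1 else 0) := by
      unfold pvCnt
      rw [List.range_succ, List.countP_append]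
      simp only [List.countP_cons, List.countP_nil]
      by_cases h1 : ord.getD m ' ' = s.getD j ' ' <;>
        by_cases h2 : gene_index ≤ (m : Int)
      all_goals simp [h2]
    have hlen : ((List.range m).foldl (fun (ng : List Char) (i : Nat) =>
        if gene_index ≤ (i : Int) then pvFlipGene ng (ord.getD i ' ') s else ng) g).length
        = g.length := pv_outer_length g ord s gene_index m
    by_cases hm : gene_index ≤ (m : Int)
    · rw [if_pos hm, pvFlipGene_getD _ _ _ _ (by omega)]
      by_cases heq : s.getD j ' ' = ord.getD m ' '
      · rw [if_pos heq, ih, hcnt, if_pos ⟨hm, heq.symm⟩, Function.iterate_succ_apply']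
      · rw [if_neg heq, ih, hcnt, if_neg (fun h => heq h.2.symm)]
        simp
    · rw [if_neg hm, ih, hcnt, if_neg (fun h => hm h.1)]
      simp

-- parity of the iterated flip rule
theorem pvToggle_iter_parity (c g : Char) :
    ∀ k : Nat, (pvToggle c)^[2*k+1] g = (if g = '+' then c else '+')
      ∧ (pvToggle c)^[2*k+2] g = (if g = '+' then '+' else c) := by
  intro k
  induction k with
  | zero =>
    constructor
    · simp [pvToggle]
    · show (pvToggle c)^[1+1] g = _
      rw [Function.iterate_succ_apply', Function.iterate_one]
      unfold pvToggle
      by_cases hg : g = '+' <;> by_cases hc : c = '+' <;> simp [hg, hc]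
  | succ k ih =>
    have h1 : 2*(k+1)+1 = (2*k+2)+1 := by ring
    have h2 : 2*(k+1)+2 = (2*(k+1)+1)+1 := by ring
    have step1 : (pvToggle c)^[2*(k+1)+1] g = (if g = '+' then c else '+') := by
      rw [h1, Function.iterate_succ_apply', ih.2]
      unfold pvToggle
      by_cases hg : g = '+' <;> by_cases hc : c = '+' <;> simp [hg, hc]
    refine ⟨step1, ?_⟩
    rw [h2, Function.iterate_succ_apply', step1]
    unfold pvToggle
    by_cases hg : g = '+' <;> by_cases hc : c = '+' <;> simp [hg, hc]

theorem pvToggle_iter_closed (c g : Char) (k : Nat) (hk : 1 ≤ k) :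
    (pvToggle c)^[k] g
      = if k % 2 = 1 then (if g = '+' then c else '+') else (if g = '+' then '+' else c) := by
  rcases Nat.even_or_odd k with he | ho
  · obtain ⟨q, hq⟩ := he
    have hq' : k = 2*(q-1)+2 := by omega
    have hpar : ¬ k % 2 = 1 := by omega
    rw [if_neg hpar, hq', (pvToggle_iter_parity c g (q-1)).2]
  · obtain ⟨q, hq⟩ := ho
    have hpar : k % 2 = 1 := by omega
    rw [if_pos hpar, hq, (pvToggle_iter_parity c g q).1]

-- B's dictionary count equals A's per-position flip count
theorem pv_count_eq (gene_index : Int) (ord s : List Char) (n j : Nat) :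
    ((((List.range n).filter (fun (i : Nat) => decide (gene_index ≤ (i : Int)))).map
        (fun (i : Nat) => ord.getD i ' ')).count (s.getD j ' '))
      = pvCnt gene_index ord s j n := by
  rw [List.count_eq_countP, List.countP_map, List.countP_filter]
  rfl

-- main equivalence
theorem pv_main (genotype : String) (gene_index : Int) (gene_order : String) :
    crossover_after_index genotype gene_index gene_order
      = crossover_after_index_alt genotype gene_index gene_order := by
  unfold crossover_after_index crossover_after_index_alt
  dsimp only
  set g := genotype.toList with hg
  set n := g.length with hn
  set ord := gene_order.toList with hord
  set s := PySem.List.sorted gene_order.toList (fun x => x) false with hs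
  set crossed := ((List.range n).filter (fun (i : Nat) => decide (gene_index ≤ (i : Int)))).map
      (fun (i : Nat) => ord.getD i ' ') with hcrossed
  by_cases hemp : crossed.isEmpty
  · rw [if_pos hemp]
    -- all loop conditions are false: A's fold leaves g unchanged
    have hnone : ∀ i : Nat, i < n → ¬ (gene_index ≤ (i : Int)) := by
      intro i hi hge
      have hmem : ord.getD i ' ' ∈ crossed := by
        rw [hcrossed]
        exact List.mem_map_of_mem
          (List.mem_filter.mpr ⟨List.mem_range.mpr hi, by simpa using hge⟩)
      rw [List.isEmpty_iff.mp hemp] at hmem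
      simp at hmem
    have hfold : ((List.range n).foldl (fun (ng : List Char) (i : Nat) =>
        if gene_index ≤ (i : Int) then pvFlipGene ng (ord.getD i ' ') s else ng) g) = g := by
      apply List.ext_getElem
      · exact pv_outer_length g ord s gene_index n
      · intro j h1 h2
        have hj : j < n := h2
        have hv := pv_outer_getD g ord s gene_index n j hj
        have hcnt0 : pvCnt gene_index ord s j n = 0 := by
          unfold pvCnt
          rw [List.countP_eq_zero]
          intro i hi
          simp only [Bool.and_eq_true, decide_eq_true_eq]
          intro h
          exact absurd h.2 (hnone i (List.mem_range.mp hi))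
        rw [hcnt0] at hv
        simp only [Function.iterate_zero, id] at hv
        rw [List.getD_eq_getElem _ ' ' h1, List.getD_eq_getElem _ ' ' h2] at hv
        exact hv
    rw [hfold, hg, String.ofList_toList]
  · rw [if_neg hemp]
    apply congrArg
    apply List.ext_getElem
    · rw [pv_outer_length]
      simp [hn]
    · intro j h1 h2
      have hj : j < n := by
        have := pv_outer_length g ord s gene_index n
        omega
      rw [← List.getD_eq_getElem _ ' ' h1, ← List.getD_eq_getElem _ ' ' h2]
      rw [pv_outer_getD g ord s gene_index n j hj]
      rw [List.getD_eq_getElem _ ' ' h2, List.getElem_map]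
      simp only [List.getElem_range]
      -- identify B's dictionary value with the count
      have hk : ((crossed.foldl (fun d c => d.insert c (d.getD c 0 + 1))
            PySem.Dict.empty).getD (s.getD j ' ') 0)
          = ((pvCnt gene_index ord s j n : Nat) : Int) := by
        rw [PySem.Dict.foldl_insert_getD_add_one_eq_counter, PySem.Dict.getD_counter]
        rw [hcrossed, pv_count_eq]
      rw [hk]
      by_cases hz : pvCnt gene_index ord s j n = 0
      · rw [hz]
        simp
      · have hk1 : 1 ≤ pvCnt gene_index ord s j n := by omega
        have hz' : ¬ ((pvCnt gene_index ord s j n : Int) = 0) := by exact_mod_cast hz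
        rw [if_neg hz', pvToggle_iter_closed _ _ _ hk1,
          PySem.Int.mod_eq_emod_of_pos (by norm_num)]
        by_cases hpar : pvCnt gene_index ord s j n % 2 = 1
        · have hpar' : ((pvCnt gene_index ord s j n : Int) % 2 = 1) := by exact_mod_cast hpar
          rw [if_pos hpar, if_pos hpar']
        · have hpar' : ¬ ((pvCnt gene_index ord s j n : Int) % 2 = 1) := by exact_mod_cast hpar
          rw [if_neg hpar, if_neg hpar']

-- ===== VERDICT (by name: the statement is the Claim_ definition above) =====
theorem crossover_after_index_spec : Claim_equal_crossover_after_index := by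
  intro genotype gene_index gene_order _ _
  unfold Spec_crossover_after_index
  exact pv_main genotype gene_index gene_order
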